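-- pv_equiv track=rewrite | github.com/banteg/adventofcode | day_11.py | cycle_password
-- ===== SOURCE A (Python) =====
-- from string import ascii_lowercase
--
-- secure_letters = [a for a in ascii_lowercase if a not in {'i', 'o', 'l'}]
--
-- def cycle_password(password):
--     index = [secure_letters.index(x) for x in password]
--
--     i = len(index) - 1
--     while i >= 0:
--         if index[i] == 22:  # as we removed three letters
--             index[i] = 0
--             i -= 1
--         else:
--             index[i] += 1
--             break
--
--     password = ''.join(secure_letters[i] for i in index)
--
--     return password
-- ===== SOURCE B (Python) =====
-- from string import ascii_lowercase
--
-- secure_letters = [a for a in ascii_lowercase if a not in {'i', 'o', 'l'}]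
--
-- def cycle_password(password):
--     value = 0
--     for x in password:
--         value = value * 23 + secure_letters.index(x)
--     value = (value + 1) % 23 ** len(password)
--     out = []
--     for _ in range(len(password)):
--         out.append(secure_letters[value % 23])
--         value //= 23
--     return ''.join(reversed(out))
-- ===== Notes on version B (the rewrite author's own statement) =====
-- stated objective: alternative
-- what changed: Replaces the right-to-left carry loop over a mutable digit list by base-23 arithmetic: fold the password into one integer, add 1 modulo 23**len (which reproduces the all-max wraparound), and rebuild the string by repeated divmod.
import Mathlib
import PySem

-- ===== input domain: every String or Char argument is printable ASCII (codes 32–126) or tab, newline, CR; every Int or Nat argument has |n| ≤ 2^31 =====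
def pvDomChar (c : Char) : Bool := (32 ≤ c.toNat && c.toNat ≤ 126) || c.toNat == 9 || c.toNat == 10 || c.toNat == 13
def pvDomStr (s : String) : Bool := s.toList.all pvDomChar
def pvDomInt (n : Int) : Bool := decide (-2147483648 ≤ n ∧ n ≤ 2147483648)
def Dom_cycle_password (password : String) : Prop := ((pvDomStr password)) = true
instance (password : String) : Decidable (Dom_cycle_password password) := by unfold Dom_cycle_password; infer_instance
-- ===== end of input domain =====

-- B replaces A's carry loop by base-23 arithmetic (fold, +1 mod 23^len, divmod rebuild); same cost, different algorithm.

-- module constant: secure_letters = [a for a in ascii_lowercase if a not in {'i','o','l'}]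
def pvSecureLetters : List Char :=
  "abcdefghijklmnopqrstuvwxyz".toList.filter (fun a => !(a == 'i' || a == 'o' || a == 'l'))

-- secure_letters.index(x) (A raises ValueError when x is absent; Pre_ excludes that; 0 is the total-form default)
def pvIdxOf (x : Char) : Int := (((PySem.List.index? pvSecureLetters x).getD 0 : Nat) : Int)

-- ===== PORT A =====
-- the while loop: fuel = i+1, so fuel k+1 means i = k; 'break'/'i < 0' return the list
def pvLoopA : List Int → Nat → List Int
  | idx, 0 => idx
  | idx, k + 1 =>
    if PySem.List.pyGetD idx (k : Int) 0 = 22 then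
      pvLoopA (PySem.List.pySetD idx (k : Int) 0) k
    else
      PySem.List.pySetD idx (k : Int) (PySem.List.pyGetD idx (k : Int) 0 + 1)

def cycle_password (password : String) : String :=
  let index := password.toList.map (fun x => pvIdxOf x)
  let index := pvLoopA index index.length
  String.ofList (index.map (fun i => PySem.List.pyGetD pvSecureLetters i 'a'))

-- ===== PORT B =====
-- the rebuild loop: each step emits secure_letters[value % 23] and floor-divides value by 23
def pvBuildB : Int → Nat → List Char
  | _, 0 => []
  | v, k + 1 =>
    PySem.List.pyGetD pvSecureLetters (PySem.Int.mod v 23) 'a' ::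
      pvBuildB (PySem.Int.floordiv v 23) k

def cycle_password_alt (password : String) : String :=
  let value := password.toList.foldl (fun v x => v * 23 + pvIdxOf x) 0
  let value := PySem.Int.mod (value + 1) (23 ^ password.toList.length)
  String.ofList (pvBuildB value password.toList.length).reverse

-- ===== PRECONDITION & SPEC =====
-- Pre_ excludes exactly the passwords containing a character outside secure_letters, on which
-- A's (and B's) secure_letters.index(x) raises ValueError.
def Pre_cycle_password (password : String) : Prop :=
  password.toList.all (fun c => pvSecureLetters.contains c) = true
instance (password : String) : Decidable (Pre_cycle_password password) := by
  unfold Pre_cycle_password; infer_instance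

def pvWitness_cycle_password : String := "abz"

def Spec_cycle_password (password : String) (out : String) : Prop := out = cycle_password_alt password
instance (password : String) (out : String) : Decidable (Spec_cycle_password password out) := by unfold Spec_cycle_password; infer_instance

-- ===== CLAIM (what is proved, stated in full; the proofs are below) =====
def Claim_equal_cycle_password : Prop := ∀ (password : String), Dom_cycle_password password → Pre_cycle_password password → Spec_cycle_password password (cycle_password password)

-- ===== LEMMAS AND PROOFS =====

-- the numeric value B folds up (MSB first)
def pvNum (d : List Int) : Int := d.foldl (fun v x => v * 23 + x) 0

-- MSB-first digit extraction underlying pvBuildB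
def pvDigits : Int → Nat → List Int
  | _, 0 => []
  | v, k + 1 => pvDigits (PySem.Int.floordiv v 23) k ++ [PySem.Int.mod v 23]

def pvValid (d : List Int) : Prop := ∀ x ∈ d, 0 ≤ x ∧ x < 23

theorem pvBuildB_reverse (v : Int) (k : Nat) :
    (pvBuildB v k).reverse = (pvDigits v k).map (fun i => PySem.List.pyGetD pvSecureLetters i 'a') := by
  induction k generalizing v with
  | zero => rfl
  | succ k ih => simp [pvBuildB, pvDigits, ih]

theorem pvNum_snoc (ds : List Int) (x : Int) : pvNum (ds ++ [x]) = pvNum ds * 23 + x := by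
  simp [pvNum, List.foldl_append]

theorem pvNum_bounds (d : List Int) (h : pvValid d) :
    0 ≤ pvNum d ∧ pvNum d < 23 ^ d.length := by
  induction d using List.reverseRecOn with
  | nil => simp [pvNum]
  | append_singleton ds x ih =>
    have hds : pvValid ds := fun y hy => h y (by simp [hy])
    have hx := h x (by simp)
    have := ih hds
    rw [pvNum_snoc]
    constructor
    · nlinarith [this.1, hx.1]
    · have : pvNum ds ≤ 23 ^ ds.length - 1 := by omega
      have hpow : (23:Int) ^ (ds ++ [x]).length = 23 ^ ds.length * 23 := by
        simp [pow_succ]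
      rw [hpow]; nlinarith [hx.2]

theorem pvDigits_num (d : List Int) (h : pvValid d) : pvDigits (pvNum d) d.length = d := by
  induction d using List.reverseRecOn with
  | nil => rfl
  | append_singleton ds x ih =>
    have hds : pvValid ds := fun y hy => h y (by simp [hy])
    have hx := h x (by simp)
    have hb := pvNum_bounds ds hds
    have hlen : (ds ++ [x]).length = ds.length + 1 := by simp
    rw [pvNum_snoc, hlen]
    show pvDigits (pvNum ds * 23 + x) (ds.length + 1) = ds ++ [x]
    have hdiv : PySem.Int.floordiv (pvNum ds * 23 + x) 23 = pvNum ds := by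
      rw [PySem.Int.floordiv_eq_ediv_of_pos (by norm_num)]; omega
    have hmod : PySem.Int.mod (pvNum ds * 23 + x) 23 = x := by
      rw [PySem.Int.mod_eq_emod_of_pos (by norm_num)]; omega
    simp only [pvDigits]
    rw [hdiv, hmod, ih hds]

-- the loop never touches indices ≥ fuel
theorem pvLoopA_append (ds : List Int) (c : Int) (k : Nat) (hk : k ≤ ds.length) :
    pvLoopA (ds ++ [c]) k = pvLoopA ds k ++ [c] := by
  induction k generalizing ds with
  | zero => rfl
  | succ k ih =>
    have hk' : k < ds.length := by omega
    have hget : PySem.List.pyGetD (ds ++ [c]) (k : Int) 0 = PySem.List.pyGetD ds (k : Int) 0 := by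
      simp [PySem.List.pyGetD_natCast, List.getD, List.getElem?_append_left hk']
    have hset : ∀ v : Int, PySem.List.pySetD (ds ++ [c]) (k : Int) v = (PySem.List.pySetD ds (k : Int) v) ++ [c] := by
      intro v
      simp [PySem.List.pySetD_natCast, List.set_append, if_pos hk']
    unfold pvLoopA
    rw [hget]
    split
    · rw [hset]
      exact ih (PySem.List.pySetD ds (k : Int) 0) (by simp [PySem.List.pySetD_natCast]; omega)
    · rw [hset]

-- snoc-step characterisation of A's loop
theorem pvLoopA_snoc (ds : List Int) (x : Int) :
    pvLoopA (ds ++ [x]) (ds.length + 1) =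
      if x = 22 then pvLoopA ds ds.length ++ [0] else ds ++ [x + 1] := by
  have hget : PySem.List.pyGetD (ds ++ [x]) (ds.length : Int) 0 = x := by
    simp [PySem.List.pyGetD_natCast, List.getD]
  have hset : ∀ v : Int, PySem.List.pySetD (ds ++ [x]) (ds.length : Int) v = ds ++ [v] := by
    intro v
    simp [PySem.List.pySetD_natCast]
  conv_lhs => rw [pvLoopA]
  rw [hget]
  split
  · rw [hset, pvLoopA_append ds 0 ds.length (le_refl _)]
  · rw [hset]

-- core: A's carry loop equals B's (+1 mod 23^len) in digit space
theorem pvCore (d : List Int) (h : pvValid d) :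
    pvDigits (PySem.Int.mod (pvNum d + 1) (23 ^ d.length)) d.length = pvLoopA d d.length := by
  induction d using List.reverseRecOn with
  | nil => rfl
  | append_singleton ds x ih =>
    have hds : pvValid ds := fun y hy => h y (by simp [hy])
    have hx := h x (by simp)
    have hb := pvNum_bounds ds hds
    have hlen : (ds ++ [x]).length = ds.length + 1 := by simp
    have hpowpos : (0:Int) < 23 ^ ds.length := pow_pos (by norm_num) _
    rw [hlen, pvNum_snoc, pvLoopA_snoc]
    by_cases hx22 : x = 22
    · subst hx22
      rw [if_pos rfl]
      have hval : pvNum ds * 23 + 22 + 1 = (pvNum ds + 1) * 23 := by ring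
      have hpow : (23:Int) ^ (ds.length + 1) = 23 ^ ds.length * 23 := by rw [pow_succ]
      rw [hval, hpow]
      have hmm : PySem.Int.mod ((pvNum ds + 1) * 23) (23 ^ ds.length * 23) =
          PySem.Int.mod (pvNum ds + 1) (23 ^ ds.length) * 23 := by
        rw [PySem.Int.mod_eq_emod_of_pos (by positivity),
            PySem.Int.mod_eq_emod_of_pos hpowpos,
            mul_comm (pvNum ds + 1) 23, mul_comm ((23:Int) ^ ds.length) 23,
            Int.mul_emod_mul_of_pos _ _ (by norm_num : (0:Int) < 23)]
        ring
      rw [hmm]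
      set m := PySem.Int.mod (pvNum ds + 1) (23 ^ ds.length) with hm
      have hm0 : 0 ≤ m := by
        rw [hm, PySem.Int.mod_eq_emod_of_pos hpowpos]
        exact Int.emod_nonneg _ (by positivity)
      have hdiv : PySem.Int.floordiv (m * 23) 23 = m := by
        rw [PySem.Int.floordiv_eq_ediv_of_pos (by norm_num)]; omega
      have hmod0 : PySem.Int.mod (m * 23) 23 = 0 := by
        rw [PySem.Int.mod_eq_emod_of_pos (by norm_num)]; omega
      simp only [pvDigits]
      rw [hdiv, hmod0, ih hds]
    · rw [if_neg hx22]
      have hxlt : x < 22 := lt_of_le_of_ne (by omega) hx22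
      have hlt : pvNum ds * 23 + x + 1 < 23 ^ (ds.length + 1) := by
        rw [pow_succ]; nlinarith [hb.2, hb.1]
      have hge : 0 ≤ pvNum ds * 23 + x + 1 := by nlinarith [hb.1, hx.1]
      rw [PySem.Int.mod_eq_emod_of_pos (pow_pos (by norm_num) _), Int.emod_eq_of_lt hge hlt]
      have : pvNum ds * 23 + x + 1 = pvNum ds * 23 + (x + 1) := by ring
      rw [this]
      have hvalid' : pvValid (ds ++ [x + 1]) := by
        intro y hy
        rcases List.mem_append.1 hy with hy | hy
        · exact hds y hy
        · simp at hy; omega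
      have := pvDigits_num (ds ++ [x + 1]) hvalid'
      rw [pvNum_snoc] at this
      simpa using this

-- under Pre_, the mapped indices are valid digits
theorem pvIdx_valid (c : Char) (hc : c ∈ pvSecureLetters) :
    0 ≤ pvIdxOf c ∧ pvIdxOf c < 23 := by
  have hs : (PySem.List.index? pvSecureLetters c).isSome :=
    (PySem.List.index?_isSome_iff _ _).mpr hc
  obtain ⟨k, hk⟩ := Option.isSome_iff_exists.mp hs
  obtain ⟨hklt, -, -⟩ := PySem.List.getElem_of_index?_eq_some hk
  have hlen : pvSecureLetters.length = 23 := by decide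
  have hk23 : k < 23 := hlen ▸ hklt
  unfold pvIdxOf
  rw [hk]
  simp only [Option.getD_some]
  exact ⟨Int.natCast_nonneg k, by exact_mod_cast hk23⟩

-- ===== VERDICT (by name: the statement is the Claim_ definition above) =====
theorem cycle_password_spec : Claim_equal_cycle_password := by
  intro password _ hpre
  simp only [Spec_cycle_password, cycle_password, cycle_password_alt]
  have hvalid : pvValid (password.toList.map (fun x => pvIdxOf x)) := by
    intro y hy
    rcases List.mem_map.1 hy with ⟨c, hc, rfl⟩
    refine pvIdx_valid c ?_
    have := (List.all_eq_true.1 hpre) c hc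
    simpa using this
  have hfold : password.toList.foldl (fun v x => v * 23 + pvIdxOf x) 0
      = pvNum (password.toList.map (fun x => pvIdxOf x)) := by
    simp [pvNum, List.foldl_map]
  have hlen : (password.toList.map (fun x => pvIdxOf x)).length = password.toList.length := by simp
  rw [pvBuildB_reverse, hfold]
  rw [← hlen]
  rw [pvCore _ hvalid]
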